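-- pv_equiv track=rewrite | github.com/formergen/USTxHarmsGenGUI | ustx_harms.py | get_scale_intervals
-- ===== SOURCE A (Python) =====
-- def get_scale_intervals(key_tone_index, mode):
--     major_intervals = [0, 2, 4, 5, 7, 9, 11]
--     minor_intervals = [0, 2, 3, 5, 7, 8, 10]
--
--     key_tone = key_tone_index
--
--     if mode == "major":
--         return [(key_tone + interval) % 12 for interval in major_intervals]
--     elif mode == "minor":
--         return [(key_tone + interval) % 12 for interval in minor_intervals]
--     return []
-- ===== SOURCE B (Python) =====
-- def get_scale_intervals(key_tone_index, mode):
--     if mode == "major":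
--         steps = [2, 2, 1, 2, 2, 2, 1]
--     elif mode == "minor":
--         steps = [2, 1, 2, 2, 1, 2, 2]
--     else:
--         return []
--     result = []
--     pos = 0
--     for step in steps:
--         result.append((key_tone_index + pos) % 12)
--         pos += step
--     return result
-- ===== Notes on version B (the rewrite author's own statement) =====
-- stated objective: alternative
-- what changed: B defines each scale by its whole-/half-step pattern and accumulates a running offset in one loop, instead of mapping a comprehension over a precomputed absolute-interval table.
import Mathlib
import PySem

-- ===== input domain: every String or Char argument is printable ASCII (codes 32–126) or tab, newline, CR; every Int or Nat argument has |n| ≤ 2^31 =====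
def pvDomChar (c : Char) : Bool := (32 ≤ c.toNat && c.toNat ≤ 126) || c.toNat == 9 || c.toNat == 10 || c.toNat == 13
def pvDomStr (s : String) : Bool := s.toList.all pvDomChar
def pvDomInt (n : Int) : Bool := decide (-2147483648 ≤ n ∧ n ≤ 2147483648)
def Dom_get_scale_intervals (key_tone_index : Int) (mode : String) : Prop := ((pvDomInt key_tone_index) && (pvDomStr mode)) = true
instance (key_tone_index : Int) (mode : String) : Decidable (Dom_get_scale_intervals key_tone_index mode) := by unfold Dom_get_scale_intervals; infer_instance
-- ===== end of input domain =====

-- B replaces A's absolute-interval tables by step patterns with a running accumulator (alternative decomposition, same result).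

-- ===== PORT A =====
def get_scale_intervals (key_tone_index : Int) (mode : String) : List Int :=
  let major_intervals : List Int := [0, 2, 4, 5, 7, 9, 11]
  let minor_intervals : List Int := [0, 2, 3, 5, 7, 8, 10]
  let key_tone := key_tone_index
  if mode == "major" then
    major_intervals.map (fun interval => PySem.Int.mod (key_tone + interval) 12)
  else if mode == "minor" then
    minor_intervals.map (fun interval => PySem.Int.mod (key_tone + interval) 12)
  else []

-- ===== PORT B =====
-- loop over the step list, appending (key + pos) % 12 then advancing pos
def altLoop (key_tone_index : Int) (steps : List Int) : Int × List Int :=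
  steps.foldl (fun (st : Int × List Int) step =>
    (st.1 + step, st.2 ++ [PySem.Int.mod (key_tone_index + st.1) 12])) (0, [])

def get_scale_intervals_alt (key_tone_index : Int) (mode : String) : List Int :=
  if mode == "major" then (altLoop key_tone_index [2, 2, 1, 2, 2, 2, 1]).2
  else if mode == "minor" then (altLoop key_tone_index [2, 1, 2, 2, 1, 2, 2]).2
  else []

-- ===== PRECONDITION & SPEC =====
def Spec_get_scale_intervals (key_tone_index : Int) (mode : String) (out : List Int) : Prop := out = get_scale_intervals_alt key_tone_index mode
instance (key_tone_index : Int) (mode : String) (out : List Int) : Decidable (Spec_get_scale_intervals key_tone_index mode out) := by unfold Spec_get_scale_intervals; infer_instance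

-- ===== CLAIM (what is proved, stated in full; the proofs are below) =====
def Claim_equal_get_scale_intervals : Prop := ∀ (key_tone_index : Int) (mode : String), Dom_get_scale_intervals key_tone_index mode → Spec_get_scale_intervals key_tone_index mode (get_scale_intervals key_tone_index mode)

-- ===== LEMMAS AND PROOFS =====

-- ===== VERDICT (by name: the statement is the Claim_ definition above) =====
theorem get_scale_intervals_spec : Claim_equal_get_scale_intervals := by
  intro k mode _
  unfold Spec_get_scale_intervals get_scale_intervals get_scale_intervals_alt altLoop
  by_cases h1 : mode == "major" <;> by_cases h2 : mode == "minor" <;>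
    simp [h1, h2, List.foldl, List.map]
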